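-- pv_equiv track=rewrite | github.com/NANAFREE/ZDE_TrueMusic-Extended-Mods-Script-Generator | 1.0.py | generate_new_filenames
-- ===== SOURCE A (Python) =====
-- def generate_new_filenames(count):
--     """生成新的文件名，使用字母组合"""
--     def get_next_filename(current):
--         if not current:
--             return 'a'
--         last_char = current[-1]
--         if last_char == 'z':
--             return get_next_filename(current[:-1]) + 'a'
--         else:
--             return current[:-1] + chr(ord(last_char) + 1)
--
--     filenames = []
--     current = ''
--     for _ in range(count):
--         current = get_next_filename(current)
--         filenames.append(current)
--     return filenames
-- ===== SOURCE B (Python) =====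
-- def generate_new_filenames(count):
--     """生成新的文件名，使用字母组合"""
--     filenames = []
--     for i in range(1, count + 1):
--         n = i
--         name = ''
--         while n:
--             n -= 1
--             name = chr(n % 26 + 97) + name
--             n //= 26
--         filenames.append(name)
--     return filenames
-- ===== Notes on version B (the rewrite author's own statement) =====
-- stated objective: simpler
-- what changed: Each filename is computed independently by bijective base-26 conversion of its 1-based index (decrement, take digit mod 26, divide), instead of incrementally carrying a running string through a recursive successor-with-carry function.
import Mathlib
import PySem

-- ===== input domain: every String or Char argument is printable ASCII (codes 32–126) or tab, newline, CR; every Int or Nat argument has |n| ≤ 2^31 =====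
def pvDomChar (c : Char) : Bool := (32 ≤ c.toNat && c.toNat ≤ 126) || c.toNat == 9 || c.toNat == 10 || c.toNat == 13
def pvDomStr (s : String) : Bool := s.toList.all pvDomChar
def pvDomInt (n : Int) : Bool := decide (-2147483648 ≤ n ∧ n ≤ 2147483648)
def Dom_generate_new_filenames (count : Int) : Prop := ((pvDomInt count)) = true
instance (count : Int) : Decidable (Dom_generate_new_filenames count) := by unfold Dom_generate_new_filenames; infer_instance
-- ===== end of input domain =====

-- B computes each name independently by bijective base-26 conversion of its 1-based index,
-- instead of A's incremental string successor with carry; objective: simpler (no faster: same order of work).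

-- ===== PORT A =====
-- get_next_filename: recursive successor on the letter string (carry on 'z')
def pvNextName (cur : List Char) : List Char :=
  if h : cur = [] then ['a']
  else
    let last := cur.getLast h
    if last = 'z' then pvNextName cur.dropLast ++ ['a']
    else cur.dropLast ++ [Char.ofNat (last.toNat + 1)]
termination_by cur.length
decreasing_by
  simp [List.length_dropLast]
  exact List.length_pos_iff.mpr h

def generate_new_filenames (count : Int) : List String :=
  ((PySem.List.pyRange 0 count 1).foldl
    (fun (st : List Char × List String) _ =>
      let cur := pvNextName st.1
      (cur, st.2 ++ [String.ofList cur]))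
    ([], [])).2

-- ===== PORT B =====
-- while loop of Source B: n -= 1; prepend chr(n%26+97); n //= 26  — as structural recursion on n
def pvToName (n : Int) : List Char :=
  if _h : n ≤ 0 then []
  else pvToName (PySem.Int.floordiv (n - 1) 26) ++ [Char.ofNat ((PySem.Int.mod (n - 1) 26).toNat + 97)]
termination_by n.toNat
decreasing_by
  rw [PySem.Int.floordiv_eq_ediv_of_pos (by norm_num)]
  have h1 : 0 ≤ (n - 1) / 26 := Int.ediv_nonneg (by omega) (by norm_num)
  have h2 : (n - 1) / 26 ≤ n - 1 := Int.ediv_le_self _ (by omega)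
  omega

def generate_new_filenames_alt (count : Int) : List String :=
  (PySem.List.pyRange 1 (count + 1) 1).foldl
    (fun acc i => acc ++ [String.ofList (pvToName i)]) []

-- ===== PRECONDITION & SPEC =====
def Spec_generate_new_filenames (count : Int) (out : List String) : Prop := out = generate_new_filenames_alt count
instance (count : Int) (out : List String) : Decidable (Spec_generate_new_filenames count out) := by unfold Spec_generate_new_filenames; infer_instance

-- ===== CLAIM (what is proved, stated in full; the proofs are below) =====
def Claim_equal_generate_new_filenames : Prop := ∀ (count : Int), Dom_generate_new_filenames count → Spec_generate_new_filenames count (generate_new_filenames count)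

-- ===== LEMMAS AND PROOFS =====

-- Nat version of pvToName, for the induction
def toNameN (n : Nat) : List Char :=
  if n = 0 then []
  else toNameN ((n - 1) / 26) ++ [Char.ofNat ((n - 1) % 26 + 97)]
termination_by n
decreasing_by
  have := Nat.div_le_self (n - 1) 26
  omega

theorem pvToName_natCast (n : Nat) : pvToName (n : Int) = toNameN n := by
  induction n using Nat.strong_induction_on with
  | _ n ih =>
    rw [pvToName, toNameN]
    by_cases h : n = 0
    · simp [h]
    · have hn : ¬ ((n : Int) ≤ 0) := by omega
      have hc : ((n : Int) - 1) = ((n - 1 : Nat) : Int) := by omega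
      have h26 : (26 : Int) = ((26 : Nat) : Int) := rfl
      rw [dif_neg hn, if_neg h, hc, h26, PySem.Int.floordiv_natCast, PySem.Int.mod_natCast,
        Int.toNat_natCast]
      rw [ih ((n - 1) / 26) (by have := Nat.div_le_self (n - 1) 26; omega)]

theorem char_toNat_digit (r : Nat) (h : r < 26) : (Char.ofNat (r + 97)).toNat = r + 97 := by
  interval_cases r <;> decide

theorem char_digit_eq_z (r : Nat) (h : r < 26) : Char.ofNat (r + 97) = 'z' ↔ r = 25 := by
  interval_cases r <;> simp

theorem next_toNameN (n : Nat) : pvNextName (toNameN n) = toNameN (n + 1) := by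
  induction n using Nat.strong_induction_on with
  | _ n ih =>
    by_cases h : n = 0
    · subst h
      have t0 : toNameN 0 = [] := by rw [toNameN]; simp
      have t1 : toNameN 1 = ['a'] := by rw [toNameN]; simp [t0]
      rw [t0, t1, pvNextName]
      simp
    · have hdm := Nat.div_add_mod (n - 1) 26
      have hr : (n - 1) % 26 < 26 := Nat.mod_lt _ (by norm_num)
      rw [toNameN, if_neg h]
      rw [pvNextName]
      have hne : toNameN ((n - 1) / 26) ++ [Char.ofNat ((n - 1) % 26 + 97)] ≠ [] := by simp
      rw [dif_neg hne]
      rw [List.getLast_concat, List.dropLast_concat]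
      have h1 : ¬ (n + 1 = 0) := by omega
      by_cases hz : (n - 1) % 26 = 25
      · rw [if_pos ((char_digit_eq_z _ hr).mpr hz)]
        conv_rhs => rw [toNameN]
        rw [if_neg h1]
        have h2 : (n + 1 - 1) / 26 = (n - 1) / 26 + 1 := by omega
        have h3 : (n + 1 - 1) % 26 = 0 := by omega
        rw [h2, h3, ih ((n - 1) / 26) (by have := Nat.div_le_self (n - 1) 26; omega)]
      · rw [if_neg (fun hc => hz ((char_digit_eq_z _ hr).mp hc))]
        rw [char_toNat_digit _ hr]
        conv_rhs => rw [toNameN]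
        rw [if_neg h1]
        have h2 : (n + 1 - 1) / 26 = (n - 1) / 26 := by omega
        have h3 : (n + 1 - 1) % 26 = (n - 1) % 26 + 1 := by omega
        rw [h2, h3]

-- A's loop invariant: folding k steps from current name toNameN m appends names m+1 .. m+k
theorem foldA_inv (l : List Int) (m : Nat) (acc : List String) :
    l.foldl (fun (st : List Char × List String) _ =>
        let cur := pvNextName st.1
        (cur, st.2 ++ [String.ofList cur])) (toNameN m, acc)
      = (toNameN (m + l.length),
         acc ++ (List.range l.length).map (fun j => String.ofList (toNameN (m + j + 1)))) := by
  induction l generalizing m acc with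
  | nil => simp
  | cons x xs ih =>
    simp only [List.foldl_cons, next_toNameN, List.length_cons]
    rw [ih (m + 1), Prod.mk.injEq]
    have e1 : m + 1 + xs.length = m + (xs.length + 1) := by omega
    refine ⟨by rw [e1], ?_⟩
    rw [List.range_succ_eq_map]
    simp only [List.map_cons, List.map_map, List.append_assoc, List.singleton_append,
      Nat.add_zero]
    apply congrArg
    apply congrArg (fun t => String.ofList (toNameN (m + 1)) :: t)
    apply List.map_congr_left
    intro j hj
    simp only [Function.comp_apply, Nat.succ_eq_add_one]
    have e2 : m + 1 + j + 1 = m + (j + 1) + 1 := by omega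
    rw [e2]

-- ===== VERDICT (by name: the statement is the Claim_ definition above) =====
theorem generate_new_filenames_spec : Claim_equal_generate_new_filenames := by
  intro count _
  unfold Spec_generate_new_filenames generate_new_filenames generate_new_filenames_alt
  rw [PySem.List.foldl_append_singleton_eq_map]
  have h0 : toNameN 0 = [] := by rw [toNameN]; simp
  rw [← h0, foldA_inv]
  simp only [List.nil_append]
  rw [PySem.List.pyRange_one 1 (count + 1), PySem.List.pyRange_one 0 count, List.map_map]
  have hlen : ((count + 1) - 1).toNat = (count - 0).toNat := by omega
  simp only [List.length_map, List.length_range, hlen]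
  apply List.map_congr_left
  intro j hj
  simp only [Function.comp]
  have hcast : (1 : Int) + (j : Int) = ((j + 1 : Nat) : Int) := by push_cast; ring
  rw [hcast, pvToName_natCast]
  congr 2
  omega
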